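-- pv_equiv track=rewrite | github.com/Prabhat0710/clav-lang | main.py | is_assignment
-- ===== SOURCE A (Python) =====
-- def is_assignment(line):
--     in_string = False
--
--     for i, ch in enumerate(line):
--         if ch == '"':
--             in_string = not in_string
--
--         # detect single '=' but NOT '==' and NOT inside string
--         if ch == "=" and not in_string:
--             if i + 1 < len(line) and line[i + 1] == "=":
--                 continue
--             return True
--
--     return False
-- ===== SOURCE B (Python) =====
-- def is_assignment(line):
--     # Even-indexed pieces of line.split('"') are the parts outside double quotes;
--     # A returns True iff any '=' occurs there (its '==' skip is a no-op: the last
--     # '=' of a run always triggers the return).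
--     segments = line.split('"')
--     return any('=' in seg for i, seg in enumerate(segments) if i % 2 == 0)
-- ===== Notes on version B (the rewrite author's own statement) =====
-- stated objective: alternative
-- what changed: Replaced the stateful char-by-char scan (with its redundant '==' lookahead) by split-on-quote: B splits the line at every '"' and checks whether any even-indexed segment (the parts outside strings) contains '='.
import Mathlib
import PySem

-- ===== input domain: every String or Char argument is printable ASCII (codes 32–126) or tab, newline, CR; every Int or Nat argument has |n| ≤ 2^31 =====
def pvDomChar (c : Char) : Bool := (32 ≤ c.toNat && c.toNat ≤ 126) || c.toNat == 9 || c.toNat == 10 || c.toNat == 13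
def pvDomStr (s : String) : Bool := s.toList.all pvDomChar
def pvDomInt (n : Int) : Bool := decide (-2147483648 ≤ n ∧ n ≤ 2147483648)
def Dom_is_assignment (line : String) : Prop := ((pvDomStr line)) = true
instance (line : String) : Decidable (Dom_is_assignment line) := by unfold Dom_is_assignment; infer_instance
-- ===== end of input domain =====

-- B replaces A's stateful char scan by split-on-quote: check '=' in the even-indexed
-- segments of line.split('"') (the parts outside double quotes); same cost, different algorithm.


-- ===== PORT A =====
-- A's 'for i, ch in enumerate(line)' with early return, state in_string, and the
-- lookahead line[i+1]; cs is the whole string for the lookahead, l the remaining suffix.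
def isAssignLoopA (cs : List Char) : List Char → Int → Bool → Bool
  | [], _, _ => false
  | ch :: rest, i, inStr =>
    let inStr' := if ch = '"' then !inStr else inStr
    if (ch == '=') && !inStr' then
      if decide (i + 1 < (cs.length : Int)) && (PySem.List.pyGet? cs (i + 1) == some '=') then
        isAssignLoopA cs rest (i + 1) inStr'
      else true
    else isAssignLoopA cs rest (i + 1) inStr'

def is_assignment (line : String) : Bool :=
  isAssignLoopA line.toList line.toList 0 false

-- ===== PORT B =====
-- Source B: segments = line.split('"'); any('=' in seg for i, seg in enumerate(segments) if i % 2 == 0)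
def is_assignment_alt (line : String) : Bool :=
  let segments := PySem.Chars.splitOn line.toList ['"']
  (PySem.List.enumerate segments 0).any
    (fun p => (PySem.Int.mod p.1 2 == 0) && PySem.Chars.isIn ['='] p.2)

-- ===== PRECONDITION & SPEC =====
def Spec_is_assignment (line : String) (out : Bool) : Prop := out = is_assignment_alt line
instance (line : String) (out : Bool) : Decidable (Spec_is_assignment line out) := by unfold Spec_is_assignment; infer_instance

-- ===== CLAIM (what is proved, stated in full; the proofs are below) =====
def Claim_equal_is_assignment : Prop := ∀ (line : String), Dom_is_assignment line → Spec_is_assignment line (is_assignment line)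

-- ===== LEMMAS AND PROOFS =====

-- Reference scan: A's loop without the redundant '==' lookahead.
def gScan : List Char → Bool → Bool
  | [], _ => false
  | c :: r, s =>
    let s' := if c = '"' then !s else s
    ((c == '=') && !s') || gScan r s'

-- Reference split of a line at '"'.
def mySplit : List Char → List (List Char)
  | [] => [[]]
  | c :: r =>
    if c = '"' then [] :: mySplit r
    else
      match mySplit r with
      | [] => [[c]]    -- unreachable: mySplit is never []
      | h :: t => (c :: h) :: t

-- Alternating any: out = currently outside a string.
def altAny : Bool → List (List Char) → Bool
  | _, [] => false
  | out, seg :: rest => (out && seg.contains '=') || altAny (!out) rest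

theorem mySplit_ne_nil (cs : List Char) : mySplit cs ≠ [] := by
  cases cs with
  | nil => simp [mySplit]
  | cons c r =>
    simp only [mySplit]
    split
    · simp
    · split <;> simp

def consHead (pre : List Char) : List (List Char) → List (List Char)
  | [] => [pre]
  | h :: t => (pre ++ h) :: t

theorem splitOn_go_eq (l : List Char) : ∀ (fuel : Nat) (cur : List Char) (acc : List (List Char)),
    l.length < fuel →
    PySem.Chars.splitOn.go ['"'] fuel l cur acc = acc.reverse ++ consHead cur.reverse (mySplit l) := by
  induction l with
  | nil =>
    intro fuel cur acc h
    obtain ⟨f, rfl⟩ : ∃ f, fuel = f + 1 := ⟨fuel - 1, by omega⟩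
    rw [PySem.Chars.splitOn.go]
    · simp [mySplit, consHead]
    · omega
  | cons c rest ih =>
    intro fuel cur acc h
    obtain ⟨f, rfl⟩ : ∃ f, fuel = f + 1 := ⟨fuel - 1, by omega⟩
    rw [PySem.Chars.splitOn.go]
    by_cases hc : c = '"'
    · subst hc
      rw [if_pos (by simp [List.isPrefixOf])]
      have hd : List.drop (['"'] : List Char).length ('"' :: rest) = rest := by simp
      rw [hd, ih f [] (cur.reverse :: acc) (by simp at h; omega)]
      simp only [mySplit]
      obtain ⟨h0, t0, ht⟩ : ∃ h0 t0, mySplit rest = h0 :: t0 := by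
        cases hm : mySplit rest with
        | nil => exact absurd hm (mySplit_ne_nil rest)
        | cons a b => exact ⟨a, b, rfl⟩
      simp [ht, consHead]
    · rw [if_neg (by simp [List.isPrefixOf]; exact fun hq => hc hq.symm)]
      rw [ih f (c :: cur) acc (by simp at h; omega)]
      simp only [mySplit, if_neg hc]
      obtain ⟨h0, t0, ht⟩ : ∃ h0 t0, mySplit rest = h0 :: t0 := by
        cases hm : mySplit rest with
        | nil => exact absurd hm (mySplit_ne_nil rest)
        | cons a b => exact ⟨a, b, rfl⟩
      simp [ht, consHead]

theorem splitOn_eq_mySplit (cs : List Char) :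
    PySem.Chars.splitOn cs ['"'] = mySplit cs := by
  rw [PySem.Chars.splitOn, splitOn_go_eq cs (cs.length + 1) [] [] (by omega)]
  obtain ⟨h0, t0, ht⟩ : ∃ h0 t0, mySplit cs = h0 :: t0 := by
    cases hm : mySplit cs with
    | nil => exact absurd hm (mySplit_ne_nil cs)
    | cons a b => exact ⟨a, b, rfl⟩
  simp [ht, consHead]

-- A's loop equals the reference scan: the '==' lookahead skip is a no-op.
theorem loopA_eq_gScan (l : List Char) : ∀ (pre : List Char) (inStr : Bool),
    isAssignLoopA (pre ++ l) l (pre.length : Int) inStr = gScan l inStr := by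
  induction l with
  | nil => intro pre inStr; simp [isAssignLoopA, gScan]
  | cons ch rest ih =>
    intro pre inStr
    have hget : PySem.List.pyGet? (pre ++ ch :: rest) ((pre.length : Int) + 1) = rest.head? := by
      have hcast : ((pre.length + 1 : Nat) : Int) = (pre.length : Int) + 1 := by push_cast; ring
      rw [← hcast, PySem.List.pyGet?_natCast]
      rcases rest with _ | ⟨a, r⟩
      · simp
      · rw [show pre ++ ch :: a :: r = (pre ++ [ch]) ++ a :: r by simp]
        rw [List.getElem?_append_right (by simp)]
        simp
    rw [isAssignLoopA, gScan]
    set inStr' := if ch = '"' then !inStr else inStr with hs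
    have hrec : isAssignLoopA (pre ++ ch :: rest) rest ((pre.length : Int) + 1) inStr' = gScan rest inStr' := by
      have h1 := ih (pre ++ [ch]) inStr'
      rw [List.append_assoc] at h1
      simpa using h1
    by_cases hcond : ((ch == '=') && !inStr') = true
    · rw [if_pos hcond]
      rcases hrest : rest with _ | ⟨a, r⟩
      · subst hrest
        rw [if_neg (by rw [hget]; simp)]
        simp [gScan, hcond]
      · by_cases ha : a = '='
        · subst ha hrest
          rw [if_pos (by rw [hget]; simp [List.length_append])]
          rw [hrec]
          have hf : inStr' = false := by
            rcases Bool.and_eq_true .. |>.mp hcond with ⟨_, h2⟩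
            simpa using h2
          have hch : (ch == '=') = true := (Bool.and_eq_true .. |>.mp hcond).1
          simp [gScan, hf, hch]
        · subst hrest
          rw [if_neg (by rw [hget]; simp [ha])]
          simp [gScan, hcond]
    · rw [if_neg hcond]
      rw [hrec]
      have hf : ((ch == '=') && !inStr') = false := by
        rwa [Bool.not_eq_true] at hcond
      simp [hf]

-- reference scan equals the alternating any over mySplit
theorem gScan_eq_altAny (cs : List Char) : ∀ (s : Bool),
    gScan cs s = altAny (!s) (mySplit cs) := by
  induction cs with
  | nil => intro s; simp [gScan, mySplit, altAny]
  | cons c r ih =>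
    intro s
    by_cases hc : c = '"'
    · subst hc
      rw [show gScan ('"' :: r) s = gScan r (!s) from by simp [gScan]]
      rw [show mySplit ('"' :: r) = [] :: mySplit r from by simp [mySplit]]
      rw [ih (!s)]
      simp [altAny]
    · obtain ⟨h0, t0, ht⟩ : ∃ h0 t0, mySplit r = h0 :: t0 := by
        cases hm : mySplit r with
        | nil => exact absurd hm (mySplit_ne_nil r)
        | cons a b => exact ⟨a, b, rfl⟩
      rw [show mySplit (c :: r) = (c :: h0) :: t0 from by simp [mySplit, hc, ht]]
      rw [show gScan (c :: r) s = (((c == '=') && !s) || gScan r s) from by simp [gScan, hc]]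
      rw [ih s, ht]
      by_cases he : c = '='
      · subst he
        cases s <;> simp [altAny]
      · have h1 : (c == '=') = false := by simp [he]
        have h2 : ¬ ('=' = c) := fun h => he h.symm
        cases s <;> simp [altAny, h1, h2]

theorem isIn_singleton_eq_contains (c : Char) (seg : List Char) :
    PySem.Chars.isIn [c] seg = seg.contains c := by
  by_cases h : c ∈ seg
  · have : [c] <:+: seg := by
      obtain ⟨s, t, rfl⟩ := List.append_of_mem h
      exact ⟨s, t, by simp⟩
    simp [(PySem.Chars.isIn_iff_infix _ _).mpr this, List.contains_eq_mem, h]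
  · have : ¬ [c] <:+: seg := fun hin => h (hin.sublist.subset (by simp))
    simp [(PySem.Chars.isIn_eq_false_iff _ _).mpr this, List.contains_eq_mem, h]

theorem mod_two_toggle (k : Int) :
    (PySem.Int.mod (k + 1) 2 == 0) = !(PySem.Int.mod k 2 == 0) := by
  rw [PySem.Int.mod_eq_emod_of_pos (by norm_num), PySem.Int.mod_eq_emod_of_pos (by norm_num)]
  by_cases h : k % 2 = 0
  · have : (k + 1) % 2 = 1 := by omega
    simp [h, this]
  · have h1 : k % 2 = 1 := by omega
    have : (k + 1) % 2 = 0 := by omega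
    simp [h1, this]

theorem enumAny_eq_altAny (segs : List (List Char)) : ∀ (k : Int),
    ((PySem.List.enumerate segs k).any
      (fun p => (PySem.Int.mod p.1 2 == 0) && PySem.Chars.isIn ['='] p.2))
     = altAny (PySem.Int.mod k 2 == 0) segs := by
  induction segs with
  | nil => intro k; simp [PySem.List.enumerate_nil, altAny]
  | cons seg rest ih =>
    intro k
    rw [PySem.List.enumerate_cons, List.any_cons, ih (k + 1), mod_two_toggle,
      isIn_singleton_eq_contains]
    simp [altAny]

-- ===== VERDICT (by name: the statement is the Claim_ definition above) =====
theorem is_assignment_spec : Claim_equal_is_assignment := by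
  intro line _
  unfold Spec_is_assignment is_assignment is_assignment_alt
  rw [splitOn_eq_mySplit, enumAny_eq_altAny]
  rw [show (PySem.Int.mod 0 2 == 0) = true from by decide]
  have hA := loopA_eq_gScan line.toList [] false
  simp only [List.nil_append, List.length_nil, Nat.cast_zero] at hA
  rw [hA, gScan_eq_altAny]
  rfl
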